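-- pv_equiv track=rewrite | github.com/yeling/leetcode | leetcode1796.py | secondHighest2
-- ===== SOURCE A (Python) =====
-- def secondHighest2(s: str) -> int:
--     first = -1
--     second = -1
--     for v in s:
--         uni = ord(v) - 48
--         if uni >= 0 and uni <= 9:
--             if uni > first:
--                 second = first
--                 first = uni
--             elif uni == first:
--                 continue
--             elif uni > second:
--                 second = uni
--
--     return second
-- ===== SOURCE B (Python) =====
-- def secondHighest2(s: str) -> int:
--     seen = [False] * 10
--     for c in s:
--         d = ord(c) - 48
--         if 0 <= d <= 9:
--             seen[d] = True
--     found = 0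
--     for d in range(9, -1, -1):
--         if seen[d]:
--             found += 1
--             if found == 2:
--                 return d
--     return -1
-- ===== Notes on version B (the rewrite author's own statement) =====
-- stated objective: alternative
-- what changed: Replaced the single-pass two-variable (first, second) tracking with a presence table over the ten digits built in one pass, followed by a descending scan 9..0 that returns the second marked digit.
import Mathlib
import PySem

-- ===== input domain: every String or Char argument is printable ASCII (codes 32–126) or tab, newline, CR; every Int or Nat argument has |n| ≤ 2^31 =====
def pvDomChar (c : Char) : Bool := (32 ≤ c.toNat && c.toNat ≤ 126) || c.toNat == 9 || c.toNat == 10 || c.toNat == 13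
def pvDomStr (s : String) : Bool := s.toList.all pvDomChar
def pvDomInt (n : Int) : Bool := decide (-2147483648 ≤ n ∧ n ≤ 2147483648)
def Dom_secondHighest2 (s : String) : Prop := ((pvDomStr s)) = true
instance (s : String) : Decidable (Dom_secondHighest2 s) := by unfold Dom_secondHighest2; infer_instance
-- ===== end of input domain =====

-- B replaces A's two-variable (first, second) tracking with a 10-entry presence table
-- plus a descending scan that returns the second marked digit (objective: alternative).

-- ===== PORT A =====
def secondHighest2_step (fs : Int × Int) (v : Char) : Int × Int :=
  if (v.toNat : Int) - 48 ≥ 0 ∧ (v.toNat : Int) - 48 ≤ 9 then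
    if (v.toNat : Int) - 48 > fs.1 then ((v.toNat : Int) - 48, fs.1)
    else if (v.toNat : Int) - 48 = fs.1 then fs
    else if (v.toNat : Int) - 48 > fs.2 then (fs.1, (v.toNat : Int) - 48)
    else fs
  else fs

def secondHighest2 (s : String) : Int :=
  (s.toList.foldl secondHighest2_step (-1, -1)).2

-- ===== PORT B =====
def secondHighest2_mark (seen : List Bool) (c : Char) : List Bool :=
  if 0 ≤ (c.toNat : Int) - 48 ∧ (c.toNat : Int) - 48 ≤ 9 then
    PySem.List.pySetD seen ((c.toNat : Int) - 48) true
  else seen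

def secondHighest2_scan (seen : List Bool) (found : Int) : List Int → Int
  | [] => -1
  | d :: rest =>
    if PySem.List.pyGetD seen d false then
      if found + 1 = 2 then d else secondHighest2_scan seen (found + 1) rest
    else secondHighest2_scan seen found rest

def secondHighest2_alt (s : String) : Int :=
  secondHighest2_scan (s.toList.foldl secondHighest2_mark (List.replicate 10 false)) 0
    (PySem.List.pyRange 9 (-1) (-1))

-- ===== PRECONDITION & SPEC =====
def Spec_secondHighest2 (s : String) (out : Int) : Prop := out = secondHighest2_alt s
instance (s : String) (out : Int) : Decidable (Spec_secondHighest2 s out) := by unfold Spec_secondHighest2; infer_instance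

-- ===== CLAIM (what is proved, stated in full; the proofs are below) =====
def Claim_equal_secondHighest2 : Prop := ∀ (s : String), Dom_secondHighest2 s → Spec_secondHighest2 s (secondHighest2 s)

-- ===== LEMMAS AND PROOFS =====

-- the (first, second) pair determined by a presence table, read off top-down
def pvUpd (p : Int × Int) (d : Int) (b : Bool) : Int × Int :=
  if b then (if p.1 = -1 then (d, -1) else if p.2 = -1 then (p.1, d) else p) else p
def pvPair : List Bool → Int × Int
  | [b0,b1,b2,b3,b4,b5,b6,b7,b8,b9] =>
    pvUpd (pvUpd (pvUpd (pvUpd (pvUpd (pvUpd (pvUpd (pvUpd (pvUpd (pvUpd (-1,-1) 9 b9) 8 b8) 7 b7) 6 b6) 5 b5) 4 b4) 3 b3) 2 b2) 1 b1) 0 b0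
  | _ => (-1, -1)

-- digit branch of A's step, on the digit value alone
def pvStepD (fs : Int × Int) (uni : Int) : Int × Int :=
  if uni > fs.1 then (uni, fs.1)
  else if uni = fs.1 then fs
  else if uni > fs.2 then (fs.1, uni)
  else fs

theorem pvTen (T : List Bool) (hT : T.length = 10) :
    ∃ b0 b1 b2 b3 b4 b5 b6 b7 b8 b9 : Bool, T = [b0,b1,b2,b3,b4,b5,b6,b7,b8,b9] := by
  rcases T with _ | ⟨b0, T⟩; · simp at hT
  rcases T with _ | ⟨b1, T⟩; · simp at hT
  rcases T with _ | ⟨b2, T⟩; · simp at hT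
  rcases T with _ | ⟨b3, T⟩; · simp at hT
  rcases T with _ | ⟨b4, T⟩; · simp at hT
  rcases T with _ | ⟨b5, T⟩; · simp at hT
  rcases T with _ | ⟨b6, T⟩; · simp at hT
  rcases T with _ | ⟨b7, T⟩; · simp at hT
  rcases T with _ | ⟨b8, T⟩; · simp at hT
  rcases T with _ | ⟨b9, T⟩; · simp at hT
  rcases T with _ | ⟨b10, T⟩
  · exact ⟨b0,b1,b2,b3,b4,b5,b6,b7,b8,b9, rfl⟩
  · simp at hT

theorem pvPair_init : pvPair (List.replicate 10 false) = (-1, -1) := by decide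

set_option maxHeartbeats 2000000 in
theorem pvScan_pair : ∀ b0 b1 b2 b3 b4 b5 b6 b7 b8 b9 : Bool,
    secondHighest2_scan [b0,b1,b2,b3,b4,b5,b6,b7,b8,b9] 0 (PySem.List.pyRange 9 (-1) (-1))
      = (pvPair [b0,b1,b2,b3,b4,b5,b6,b7,b8,b9]).2 := by decide

set_option maxHeartbeats 4000000 in
theorem pvStep_pair : ∀ (b0 b1 b2 b3 b4 b5 b6 b7 b8 b9 : Bool) (n : Fin 10),
    pvStepD (pvPair [b0,b1,b2,b3,b4,b5,b6,b7,b8,b9]) (n : Int)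
      = pvPair (PySem.List.pySetD [b0,b1,b2,b3,b4,b5,b6,b7,b8,b9] (n : Int) true) := by decide

theorem pvStep_comm (T : List Bool) (hT : T.length = 10) (c : Char) :
    secondHighest2_step (pvPair T) c = pvPair (secondHighest2_mark T c) := by
  obtain ⟨b0,b1,b2,b3,b4,b5,b6,b7,b8,b9, rfl⟩ := pvTen T hT
  by_cases hdig : (0 : Int) ≤ (c.toNat : Int) - 48 ∧ (c.toNat : Int) - 48 ≤ 9
  · have hn : ((c.toNat : Int) - 48).toNat < 10 := by omega
    have hcast : (((⟨((c.toNat : Int) - 48).toNat, hn⟩ : Fin 10) : Int)) = (c.toNat : Int) - 48 := by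
      simp; omega
    have h1 : secondHighest2_step (pvPair [b0,b1,b2,b3,b4,b5,b6,b7,b8,b9]) c
        = pvStepD (pvPair [b0,b1,b2,b3,b4,b5,b6,b7,b8,b9]) ((c.toNat : Int) - 48) := by
      unfold secondHighest2_step pvStepD
      rw [if_pos ⟨hdig.1, hdig.2⟩]
    have h2 : secondHighest2_mark [b0,b1,b2,b3,b4,b5,b6,b7,b8,b9] c
        = PySem.List.pySetD [b0,b1,b2,b3,b4,b5,b6,b7,b8,b9] ((c.toNat : Int) - 48) true := by
      unfold secondHighest2_mark
      rw [if_pos hdig]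
    rw [h1, h2, ← hcast, pvStep_pair]
  · have h1 : secondHighest2_step (pvPair [b0,b1,b2,b3,b4,b5,b6,b7,b8,b9]) c
        = pvPair [b0,b1,b2,b3,b4,b5,b6,b7,b8,b9] := by
      unfold secondHighest2_step
      rw [if_neg (fun h => hdig ⟨h.1, h.2⟩)]
    have h2 : secondHighest2_mark [b0,b1,b2,b3,b4,b5,b6,b7,b8,b9] c
        = [b0,b1,b2,b3,b4,b5,b6,b7,b8,b9] := by
      unfold secondHighest2_mark
      rw [if_neg hdig]
    rw [h1, h2]

theorem pvMark_length (T : List Bool) (c : Char) :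
    (secondHighest2_mark T c).length = T.length := by
  unfold secondHighest2_mark
  split
  · exact PySem.List.length_pySetD ..
  · rfl

theorem pvFold_length (l : List Char) : ∀ T : List Bool,
    (l.foldl secondHighest2_mark T).length = T.length := by
  induction l with
  | nil => intro T; rfl
  | cons c l ih => intro T; simp only [List.foldl_cons]; rw [ih, pvMark_length]

theorem pvFold_comm (l : List Char) : ∀ T : List Bool, T.length = 10 →
    l.foldl secondHighest2_step (pvPair T) = pvPair (l.foldl secondHighest2_mark T) := by
  induction l with
  | nil => intro T _; rfl
  | cons c l ih =>
    intro T hT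
    simp only [List.foldl_cons]
    rw [pvStep_comm T hT c]
    exact ih _ (by rw [pvMark_length]; exact hT)

-- ===== VERDICT (by name: the statement is the Claim_ definition above) =====
theorem secondHighest2_spec : Claim_equal_secondHighest2 := by
  intro s _
  unfold Spec_secondHighest2 secondHighest2 secondHighest2_alt
  rw [← pvPair_init, pvFold_comm s.toList (List.replicate 10 false) (by simp)]
  have hlen : (s.toList.foldl secondHighest2_mark (List.replicate 10 false)).length = 10 := by
    rw [pvFold_length]; simp
  obtain ⟨b0,b1,b2,b3,b4,b5,b6,b7,b8,b9, hE⟩ :=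
    pvTen (s.toList.foldl secondHighest2_mark (List.replicate 10 false)) hlen
  rw [hE]
  exact (pvScan_pair b0 b1 b2 b3 b4 b5 b6 b7 b8 b9).symm
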